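-- pv_equiv track=rewrite | github.com/yuejiewang/FlagCX | plugin/torch/flagcx/__init__.py | replace_prefix
-- ===== SOURCE A (Python) =====
-- def replace_prefix(arg):
--     device_list = ["cuda", "mlu", "npu", "musa"]
--     flagcx_prefix = "flagcx_dev"
--     if isinstance(arg, str):
--         for string in device_list:
--             if string in arg:
--                 arg = arg.replace(string, flagcx_prefix)
--     return arg
-- ===== SOURCE B (Python) =====
-- def replace_prefix(arg):
--     if not isinstance(arg, str):
--         return arg
--     out = []
--     i, n = 0, len(arg)
--     while i < n:
--         for pat in ("cuda", "mlu", "npu", "musa"):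
--             if arg.startswith(pat, i):
--                 out.append("flagcx_dev")
--                 i += len(pat)
--                 break
--         else:
--             out.append(arg[i])
--             i += 1
--     return "".join(out)
-- ===== Notes on version B (the rewrite author's own statement) =====
-- stated objective: alternative
-- what changed: Replaces A's four sequential full-string .replace passes with a single left-to-right scan that matches all four device names at each position and builds the output once.
import Mathlib
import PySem

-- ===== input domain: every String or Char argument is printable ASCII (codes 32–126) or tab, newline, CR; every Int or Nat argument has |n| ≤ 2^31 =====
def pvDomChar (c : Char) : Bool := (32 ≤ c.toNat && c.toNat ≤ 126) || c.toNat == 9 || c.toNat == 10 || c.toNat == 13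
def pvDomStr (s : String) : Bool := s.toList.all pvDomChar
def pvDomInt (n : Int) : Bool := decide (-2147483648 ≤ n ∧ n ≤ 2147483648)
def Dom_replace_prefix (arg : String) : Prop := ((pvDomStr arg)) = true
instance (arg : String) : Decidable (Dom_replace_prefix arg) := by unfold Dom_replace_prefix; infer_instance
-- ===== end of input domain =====

-- B replaces A's four sequential full-string .replace passes by one left-to-right
-- scan matching all four device names at each position (alternative decomposition).


-- ===== PORT A =====
-- A: for each device name, if it occurs in arg, replace all its occurrences.
def replace_prefix (arg : String) : String :=
  let device_list : List String := ["cuda", "mlu", "npu", "musa"]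
  let flagcx_prefix : String := "flagcx_dev"
  device_list.foldl
    (fun a s => if PySem.Str.isIn s a then PySem.Str.replace a s flagcx_prefix else a) arg

-- ===== PORT B =====
-- B: one pass; at each position try the four device names (arg.startswith(pat, i)),
-- emit the replacement and skip the pattern on a match, else copy one character.
def pvScanB : List Char → List Char
  | [] => []
  | c :: t =>
    if List.isPrefixOf ['c','u','d','a'] (c :: t) then
      "flagcx_dev".toList ++ pvScanB (t.drop 3)
    else if List.isPrefixOf ['m','l','u'] (c :: t) then
      "flagcx_dev".toList ++ pvScanB (t.drop 2)
    else if List.isPrefixOf ['n','p','u'] (c :: t) then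
      "flagcx_dev".toList ++ pvScanB (t.drop 2)
    else if List.isPrefixOf ['m','u','s','a'] (c :: t) then
      "flagcx_dev".toList ++ pvScanB (t.drop 3)
    else c :: pvScanB t
termination_by l => l.length
decreasing_by all_goals simp [List.length_drop]

def replace_prefix_alt (arg : String) : String :=
  String.ofList (pvScanB arg.toList)

-- ===== PRECONDITION & SPEC =====
def Spec_replace_prefix (arg : String) (out : String) : Prop := out = replace_prefix_alt arg
instance (arg : String) (out : String) : Decidable (Spec_replace_prefix arg out) := by unfold Spec_replace_prefix; infer_instance

-- ===== CLAIM (what is proved, stated in full; the proofs are below) =====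
def Claim_equal_replace_prefix : Prop := ∀ (arg : String), Dom_replace_prefix arg → Spec_replace_prefix arg (replace_prefix arg)

-- ===== LEMMAS AND PROOFS =====

-- A structural-recursion characterisation of Python's s.replace(old, new) for old ≠ [].
def rep1 (old new : List Char) : List Char → List Char
  | [] => []
  | c :: t =>
    if List.isPrefixOf old (c :: t) then new ++ rep1 old new (t.drop (old.length - 1))
    else c :: rep1 old new t
termination_by l => l.length
decreasing_by all_goals simp [List.length_drop]

theorem rep1_nil (old new : List Char) : rep1 old new [] = [] := by simp [rep1]

theorem rep1_cons_pos (old new : List Char) (c : Char) (t : List Char)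
    (h : List.isPrefixOf old (c :: t) = true) :
    rep1 old new (c :: t) = new ++ rep1 old new (t.drop (old.length - 1)) := by
  rw [rep1]; simp [h]

theorem rep1_cons_neg (old new : List Char) (c : Char) (t : List Char)
    (h : ¬ List.isPrefixOf old (c :: t) = true) :
    rep1 old new (c :: t) = c :: rep1 old new t := by
  rw [rep1]; simp [h]

theorem go_eq_rep1 (old new : List Char) (hold : old ≠ []) :
    ∀ (fuel : Nat) (l acc : List Char), l.length ≤ fuel →
      PySem.Chars.replace.go old new fuel l acc = acc.reverse ++ rep1 old new l := by
  intro fuel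
  induction fuel with
  | zero =>
    intro l acc hl
    have : l = [] := by cases l <;> simp_all
    subst this
    rw [PySem.Chars.replace.go.eq_def]
    simp [rep1_nil]
  | succ fuel ih =>
    intro l acc hl
    cases l with
    | nil => rw [PySem.Chars.replace.go.eq_def]; simp [rep1_nil]
    | cons c t =>
      rw [PySem.Chars.replace.go.eq_def]
      by_cases h : List.isPrefixOf old (c :: t) = true
      · simp only [h, if_pos]
        have hlen : (List.drop old.length (c :: t)).length ≤ fuel := by
          have := List.length_drop (l := c :: t) (i := old.length)
          have h1 : 1 ≤ old.length := by cases old <;> simp_all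
          simp at hl ⊢
          omega
        rw [ih _ _ hlen, rep1_cons_pos old new c t h]
        have hdrop : List.drop old.length (c :: t) = t.drop (old.length - 1) := by
          cases old with
          | nil => exact absurd rfl hold
          | cons o os => simp
        rw [hdrop]
        simp
      · simp only [h]
        have hlen : t.length ≤ fuel := by simp at hl; omega
        rw [ih _ _ hlen, rep1_cons_neg old new c t h]
        simp

theorem replace_eq_rep1 (old new s : List Char) (hold : old ≠ []) :
    PySem.Chars.replace s old new = rep1 old new s := by
  have : old.isEmpty = false := by cases old <;> simp_all
  rw [PySem.Chars.replace, this]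
  simpa using go_eq_rep1 old new hold s.length s [] (le_refl _)

-- if old does not occur in s, rep1 is the identity
theorem rep1_of_not_infix (old new : List Char) :
    ∀ s, ¬ old <:+: s → rep1 old new s = s := by
  intro s
  induction s with
  | nil => intro _; exact rep1_nil old new
  | cons c t ih =>
    intro h
    have hpre : ¬ List.isPrefixOf old (c :: t) = true := by
      intro hp
      exact h (List.IsPrefix.isInfix (List.isPrefixOf_iff_prefix.mp hp))
    rw [rep1_cons_neg old new c t hpre, ih]
    intro hi
    exact h (hi.trans (List.suffix_cons c t).isInfix)

-- stepping over a block none of whose characters can start a match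
theorem rep1_append_of_head_ne (old new : List Char) (c0 : Char) (h0 : old.head? = some c0) :
    ∀ (a b : List Char), (∀ c ∈ a, c ≠ c0) → rep1 old new (a ++ b) = a ++ rep1 old new b := by
  intro a
  induction a with
  | nil => intro b _; simp
  | cons x xs ih =>
    intro b hmem
    have hpre : ¬ List.isPrefixOf old (x :: (xs ++ b)) = true := by
      intro hp
      rcases List.isPrefixOf_iff_prefix.mp hp with ⟨r, hr⟩
      cases old with
      | nil => simp at h0
      | cons o os =>
        simp at h0
        simp at hr
        exact hmem x (by simp) (by rw [← hr.1, h0])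
    rw [List.cons_append, rep1_cons_neg old new x (xs ++ b) hpre,
        ih b (fun c hc => hmem c (by simp [hc]))]
    simp

-- the nonempty suffixes of the four device names
def pvSuffs : List (List Char) :=
  [['c','u','d','a'], ['u','d','a'], ['d','a'], ['a'],
   ['m','l','u'], ['l','u'], ['u'],
   ['n','p','u'], ['p','u'],
   ['m','u','s','a'], ['u','s','a'], ['s','a']]

theorem pvSuffs_ne_nil : ∀ p ∈ pvSuffs, p ≠ [] := by decide

theorem pvSuffs_head_ne_f : ∀ p ∈ pvSuffs, p.head? ≠ some 'f' := by decide

theorem pvSuffs_tail : ∀ p ∈ pvSuffs, p.tail = [] ∨ p.tail ∈ pvSuffs := by decide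

-- a rep1 pass (replacement "flagcx_dev") creates no new occurrence of a device-name
-- suffix at the front of the string
theorem rep1_no_new_prefix (q : List Char) :
    ∀ (s p : List Char), p ∈ pvSuffs → ¬ p <+: s →
      ¬ p <+: rep1 q "flagcx_dev".toList s := by
  intro s
  induction s with
  | nil =>
    intro p hp _ hpre
    rw [rep1_nil] at hpre
    exact pvSuffs_ne_nil p hp (List.prefix_nil.mp hpre)
  | cons c t ih =>
    intro p hp hps
    cases p with
    | nil => intro _; exact pvSuffs_ne_nil [] hp rfl
    | cons x xs =>
      by_cases hq : List.isPrefixOf q (c :: t) = true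
      · rw [rep1_cons_pos q _ c t hq]
        rintro ⟨r, hr⟩
        apply pvSuffs_head_ne_f (x :: xs) hp
        have := congrArg List.head? hr
        simpa using this
      · rw [rep1_cons_neg q _ c t hq]
        rintro ⟨r, hr⟩
        simp only [List.cons_append, List.cons.injEq] at hr
        obtain ⟨hxc, hxr⟩ := hr
        subst hxc
        cases xs with
        | nil => exact hps ⟨t, rfl⟩
        | cons y ys =>
          have htl : (y :: ys) ∈ pvSuffs := by
            rcases pvSuffs_tail (x :: y :: ys) hp with h | h
            · simp at h
            · simpa using h
          have hnot : ¬ (y :: ys) <+: t := fun ⟨r', hr'⟩ => hps ⟨r', by simp [← hr']⟩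
          exact ih (y :: ys) htl hnot ⟨r, hxr⟩

theorem not_prefix_of_not_isPrefixOf {p l : List Char} (h : ¬ List.isPrefixOf p l = true) :
    ¬ p <+: l := fun hp => h (List.isPrefixOf_iff_prefix.mpr hp)

theorem not_isPrefixOf_of_not_prefix {p l : List Char} (h : ¬ p <+: l) :
    ¬ List.isPrefixOf p l = true := fun hp => h (List.isPrefixOf_iff_prefix.mp hp)

theorem rep1_mlu_pos (X : List Char) :
    rep1 ['m','l','u'] "flagcx_dev".toList ('m' :: 'l' :: 'u' :: X)
      = "flagcx_dev".toList ++ rep1 ['m','l','u'] "flagcx_dev".toList X := by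
  rw [rep1_cons_pos ['m','l','u'] "flagcx_dev".toList 'm' ('l' :: 'u' :: X) (by simp [List.isPrefixOf])]
  norm_num

theorem rep1_npu_pos (X : List Char) :
    rep1 ['n','p','u'] "flagcx_dev".toList ('n' :: 'p' :: 'u' :: X)
      = "flagcx_dev".toList ++ rep1 ['n','p','u'] "flagcx_dev".toList X := by
  rw [rep1_cons_pos ['n','p','u'] "flagcx_dev".toList 'n' ('p' :: 'u' :: X) (by simp [List.isPrefixOf])]
  norm_num

theorem rep1_musa_pos (X : List Char) :
    rep1 ['m','u','s','a'] "flagcx_dev".toList ('m' :: 'u' :: 's' :: 'a' :: X)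
      = "flagcx_dev".toList ++ rep1 ['m','u','s','a'] "flagcx_dev".toList X := by
  rw [rep1_cons_pos ['m','u','s','a'] "flagcx_dev".toList 'm' ('u' :: 's' :: 'a' :: X) (by simp [List.isPrefixOf])]
  norm_num

theorem rep1_mlu_skip_musa (X : List Char) :
    rep1 ['m','l','u'] "flagcx_dev".toList ('m' :: 'u' :: 's' :: 'a' :: X)
      = 'm' :: 'u' :: 's' :: 'a' :: rep1 ['m','l','u'] "flagcx_dev".toList X := by
  rw [rep1_cons_neg ['m','l','u'] "flagcx_dev".toList 'm' ('u' :: 's' :: 'a' :: X) (by simp [List.isPrefixOf])]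
  have := rep1_append_of_head_ne ['m','l','u'] "flagcx_dev".toList 'm' rfl ['u','s','a'] X (by simp)
  simpa using this

theorem main_scan :
    ∀ l : List Char,
      rep1 ['m','u','s','a'] "flagcx_dev".toList
        (rep1 ['n','p','u'] "flagcx_dev".toList
          (rep1 ['m','l','u'] "flagcx_dev".toList
            (rep1 ['c','u','d','a'] "flagcx_dev".toList l))) = pvScanB l := by
  intro l
  induction l using pvScanB.induct with
  | case1 => simp [rep1_nil, pvScanB]
  | case2 c t hc ih =>
    rw [rep1_cons_pos _ _ _ _ hc]
    norm_num
    rw [rep1_append_of_head_ne ['m','l','u'] _ 'm' rfl _ _ (by simp),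
        rep1_append_of_head_ne ['n','p','u'] _ 'n' rfl _ _ (by simp),
        rep1_append_of_head_ne ['m','u','s','a'] _ 'm' rfl _ _ (by simp),
        ih]
    conv_rhs => rw [pvScanB]
    simp [hc]
  | case3 c t hc hm ih =>
    rcases List.isPrefixOf_iff_prefix.mp hm with ⟨r, hr⟩
    simp only [List.cons_append, List.nil_append, List.cons.injEq] at hr
    obtain ⟨h1, h2⟩ := hr
    subst h1; subst h2
    have E1 : rep1 ['c','u','d','a'] "flagcx_dev".toList ('m' :: 'l' :: 'u' :: r)
        = 'm' :: 'l' :: 'u' :: rep1 ['c','u','d','a'] "flagcx_dev".toList r := by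
      have := rep1_append_of_head_ne ['c','u','d','a'] "flagcx_dev".toList 'c' rfl ['m','l','u'] r (by simp)
      simpa using this
    rw [E1, rep1_mlu_pos,
        rep1_append_of_head_ne ['n','p','u'] _ 'n' rfl _ _ (by simp),
        rep1_append_of_head_ne ['m','u','s','a'] _ 'm' rfl _ _ (by simp)]
    simp only [List.drop_succ_cons, List.drop_zero] at ih
    rw [ih]
    conv_rhs => rw [pvScanB]
    simp [hc, hm]
  | case4 c t hc hm hn ih =>
    rcases List.isPrefixOf_iff_prefix.mp hn with ⟨r, hr⟩
    simp only [List.cons_append, List.nil_append, List.cons.injEq] at hr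
    obtain ⟨h1, h2⟩ := hr
    subst h1; subst h2
    have E1 : rep1 ['c','u','d','a'] "flagcx_dev".toList ('n' :: 'p' :: 'u' :: r)
        = 'n' :: 'p' :: 'u' :: rep1 ['c','u','d','a'] "flagcx_dev".toList r := by
      have := rep1_append_of_head_ne ['c','u','d','a'] "flagcx_dev".toList 'c' rfl ['n','p','u'] r (by simp)
      simpa using this
    have E2 : rep1 ['m','l','u'] "flagcx_dev".toList ('n' :: 'p' :: 'u' :: rep1 ['c','u','d','a'] "flagcx_dev".toList r)
        = 'n' :: 'p' :: 'u' :: rep1 ['m','l','u'] "flagcx_dev".toList (rep1 ['c','u','d','a'] "flagcx_dev".toList r) := by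
      have := rep1_append_of_head_ne ['m','l','u'] "flagcx_dev".toList 'm' rfl ['n','p','u']
        (rep1 ['c','u','d','a'] "flagcx_dev".toList r) (by simp)
      simpa using this
    rw [E1, E2, rep1_npu_pos,
        rep1_append_of_head_ne ['m','u','s','a'] _ 'm' rfl _ _ (by simp)]
    simp only [List.drop_succ_cons, List.drop_zero] at ih
    rw [ih]
    conv_rhs => rw [pvScanB]
    simp [hc, hm, hn]
  | case5 c t hc hm hn hs ih =>
    rcases List.isPrefixOf_iff_prefix.mp hs with ⟨r, hr⟩
    simp only [List.cons_append, List.nil_append, List.cons.injEq] at hr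
    obtain ⟨h1, h2⟩ := hr
    subst h1; subst h2
    have E1 : rep1 ['c','u','d','a'] "flagcx_dev".toList ('m' :: 'u' :: 's' :: 'a' :: r)
        = 'm' :: 'u' :: 's' :: 'a' :: rep1 ['c','u','d','a'] "flagcx_dev".toList r := by
      have := rep1_append_of_head_ne ['c','u','d','a'] "flagcx_dev".toList 'c' rfl ['m','u','s','a'] r (by simp)
      simpa using this
    have E3 : rep1 ['n','p','u'] "flagcx_dev".toList
          ('m' :: 'u' :: 's' :: 'a' :: rep1 ['m','l','u'] "flagcx_dev".toList (rep1 ['c','u','d','a'] "flagcx_dev".toList r))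
        = 'm' :: 'u' :: 's' :: 'a' :: rep1 ['n','p','u'] "flagcx_dev".toList
            (rep1 ['m','l','u'] "flagcx_dev".toList (rep1 ['c','u','d','a'] "flagcx_dev".toList r)) := by
      have := rep1_append_of_head_ne ['n','p','u'] "flagcx_dev".toList 'n' rfl ['m','u','s','a']
        (rep1 ['m','l','u'] "flagcx_dev".toList (rep1 ['c','u','d','a'] "flagcx_dev".toList r)) (by simp)
      simpa using this
    rw [E1, rep1_mlu_skip_musa, E3, rep1_musa_pos]
    simp only [List.drop_succ_cons, List.drop_zero] at ih
    rw [ih]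
    conv_rhs => rw [pvScanB]
    simp [hc, hm, hn, hs]
  | case6 c t hc hm hn hs ih =>
    have e1 : rep1 ['c','u','d','a'] "flagcx_dev".toList (c :: t)
        = c :: rep1 ['c','u','d','a'] "flagcx_dev".toList t := rep1_cons_neg _ _ _ _ hc
    have pm : ¬ ['m','l','u'] <+: rep1 ['c','u','d','a'] "flagcx_dev".toList (c :: t) :=
      rep1_no_new_prefix _ _ _ (by decide) (not_prefix_of_not_isPrefixOf hm)
    have e2 : rep1 ['m','l','u'] "flagcx_dev".toList (rep1 ['c','u','d','a'] "flagcx_dev".toList (c :: t))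
        = c :: rep1 ['m','l','u'] "flagcx_dev".toList (rep1 ['c','u','d','a'] "flagcx_dev".toList t) := by
      rw [e1] at pm ⊢
      exact rep1_cons_neg _ _ _ _ (not_isPrefixOf_of_not_prefix pm)
    have pn : ¬ ['n','p','u'] <+: rep1 ['m','l','u'] "flagcx_dev".toList (rep1 ['c','u','d','a'] "flagcx_dev".toList (c :: t)) :=
      rep1_no_new_prefix _ _ _ (by decide)
        (rep1_no_new_prefix _ _ _ (by decide) (not_prefix_of_not_isPrefixOf hn))
    have e3 : rep1 ['n','p','u'] "flagcx_dev".toList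
          (rep1 ['m','l','u'] "flagcx_dev".toList (rep1 ['c','u','d','a'] "flagcx_dev".toList (c :: t)))
        = c :: rep1 ['n','p','u'] "flagcx_dev".toList
            (rep1 ['m','l','u'] "flagcx_dev".toList (rep1 ['c','u','d','a'] "flagcx_dev".toList t)) := by
      rw [e2] at pn ⊢
      exact rep1_cons_neg _ _ _ _ (not_isPrefixOf_of_not_prefix pn)
    have ps : ¬ ['m','u','s','a'] <+: rep1 ['n','p','u'] "flagcx_dev".toList
          (rep1 ['m','l','u'] "flagcx_dev".toList (rep1 ['c','u','d','a'] "flagcx_dev".toList (c :: t))) :=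
      rep1_no_new_prefix _ _ _ (by decide)
        (rep1_no_new_prefix _ _ _ (by decide)
          (rep1_no_new_prefix _ _ _ (by decide) (not_prefix_of_not_isPrefixOf hs)))
    have e4 : rep1 ['m','u','s','a'] "flagcx_dev".toList
          (rep1 ['n','p','u'] "flagcx_dev".toList
            (rep1 ['m','l','u'] "flagcx_dev".toList (rep1 ['c','u','d','a'] "flagcx_dev".toList (c :: t))))
        = c :: rep1 ['m','u','s','a'] "flagcx_dev".toList
            (rep1 ['n','p','u'] "flagcx_dev".toList
              (rep1 ['m','l','u'] "flagcx_dev".toList (rep1 ['c','u','d','a'] "flagcx_dev".toList t))) := by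
      rw [e3] at ps ⊢
      exact rep1_cons_neg _ _ _ _ (not_isPrefixOf_of_not_prefix ps)
    rw [e4, ih]
    conv_rhs => rw [pvScanB]
    simp [hc, hm, hn, hs]

-- one pass of A's loop body, on the character level
theorem stepA (p : String) (hp : p.toList ≠ []) (a : String) :
    (if PySem.Str.isIn p a then PySem.Str.replace a p "flagcx_dev" else a).toList
      = rep1 p.toList "flagcx_dev".toList a.toList := by
  by_cases h : PySem.Str.isIn p a = true
  · rw [if_pos h, PySem.Str.toList_replace, replace_eq_rep1 _ _ _ hp]
  · have hinf : ¬ p.toList <:+: a.toList := fun hi => h ((PySem.Str.isIn_iff_infix p a).mpr hi)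
    rw [if_neg h, rep1_of_not_infix _ _ _ hinf]

-- A's foldl over the device list, moved to the character level
theorem chainA (ps : List String) :
    ∀ a : String, (∀ p ∈ ps, p.toList ≠ []) →
      (ps.foldl (fun a s => if PySem.Str.isIn s a then PySem.Str.replace a s "flagcx_dev" else a) a).toList
        = (ps.map String.toList).foldl (fun l q => rep1 q "flagcx_dev".toList l) a.toList := by
  induction ps with
  | nil => intro a _; simp
  | cons p ps ih =>
    intro a hps
    simp only [List.foldl_cons, List.map_cons]
    rw [ih _ (fun q hq => hps q (by simp [hq])), stepA p (hps p (by simp)) a]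

-- ===== VERDICT (by name: the statement is the Claim_ definition above) =====
theorem replace_prefix_spec : Claim_equal_replace_prefix := by
  intro arg _
  show replace_prefix arg = replace_prefix_alt arg
  unfold replace_prefix replace_prefix_alt
  simp only [List.foldl_cons, List.foldl_nil]
  have hts := chainA ["cuda", "mlu", "npu", "musa"] arg (by intro p hp; fin_cases hp <;> simp)
  simp only [List.map_cons, List.map_nil, List.foldl_cons, List.foldl_nil] at hts
  rw [show ("cuda" : String).toList = ['c','u','d','a'] from by simp,
      show ("mlu" : String).toList = ['m','l','u'] from by simp,
      show ("npu" : String).toList = ['n','p','u'] from by simp,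
      show ("musa" : String).toList = ['m','u','s','a'] from by simp] at hts
  rw [main_scan arg.toList] at hts
  rw [← hts, String.ofList_toList]
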